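-- pv_equiv track=rewrite | github.com/Noah974Finance/FPA_dashboard | app.py | trim_future_zeros
-- ===== SOURCE A (Python) =====
-- def trim_future_zeros(vals):
--     res = list(vals)
--     for i in range(len(res)-1, -1, -1):
--         if res[i] == 0:
--             res[i] = None
--         else:
--             break
--     return res
-- ===== SOURCE B (Python) =====
-- def trim_future_zeros(vals):
--     res = list(vals)
--     count = 0
--     for x in reversed(res):
--         if x != 0:
--             break
--         count += 1
--     return res[:len(res) - count] + [None] * count
-- ===== Notes on version B (the rewrite author's own statement) =====
-- stated objective: alternative
-- what changed: B splits the task into two phases: count the trailing zeros on the reversed list, then build the result in one shot as a slice plus [None]*count, instead of A's in-place backward index loop that mutates entries until break.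
import Mathlib
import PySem

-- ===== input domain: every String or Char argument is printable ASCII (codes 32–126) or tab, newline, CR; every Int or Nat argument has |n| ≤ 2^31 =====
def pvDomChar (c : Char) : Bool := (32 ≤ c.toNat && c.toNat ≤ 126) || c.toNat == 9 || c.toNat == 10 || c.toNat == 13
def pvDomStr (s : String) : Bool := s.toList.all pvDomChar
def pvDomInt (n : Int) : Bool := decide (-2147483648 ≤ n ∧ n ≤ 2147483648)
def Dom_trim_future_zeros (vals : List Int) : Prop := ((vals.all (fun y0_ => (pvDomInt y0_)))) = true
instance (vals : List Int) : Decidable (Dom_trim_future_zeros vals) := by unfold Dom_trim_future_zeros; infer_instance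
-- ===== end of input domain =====

-- B replaces A's in-place backward mutation loop by two phases: count the trailing zeros,
-- then build the result as slice ++ replicate None (alternative decomposition, same cost).

-- ===== PORT A =====
-- the backward for-loop: res[i] = None while res[i] == 0, break otherwise (break = return res)
def trimLoopA (res : List (Option Int)) (idxs : List Int) : List (Option Int) :=
  match idxs with
  | [] => res
  | i :: rest =>
      if PySem.List.pyGet? res i = some (some 0) then
        trimLoopA (res.set i.toNat none) rest
      else
        res

def trim_future_zeros (vals : List Int) : List (Option Int) :=
  trimLoopA (vals.map some) (PySem.List.pyRange ((vals.length : Int) - 1) (-1) (-1))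

-- ===== PORT B =====
-- the counting loop of Source B: walk the reversed list, stop at the first nonzero
def countTrailB : List Int → Nat
  | [] => 0
  | x :: rest => if x ≠ 0 then 0 else countTrailB rest + 1

def trim_future_zeros_alt (vals : List Int) : List (Option Int) :=
  let count := countTrailB vals.reverse
  (vals.take (vals.length - count)).map some ++ List.replicate count none

-- ===== PRECONDITION & SPEC =====
def Spec_trim_future_zeros (vals : List Int) (out : List (Option Int)) : Prop := out = trim_future_zeros_alt vals
instance (vals : List Int) (out : List (Option Int)) : Decidable (Spec_trim_future_zeros vals out) := by unfold Spec_trim_future_zeros; infer_instance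

-- ===== CLAIM (what is proved, stated in full; the proofs are below) =====
def Claim_equal_trim_future_zeros : Prop := ∀ (vals : List Int), Dom_trim_future_zeros vals → Spec_trim_future_zeros vals (trim_future_zeros vals)

-- ===== LEMMAS AND PROOFS =====

lemma countTrailB_le (l : List Int) : countTrailB l ≤ l.length := by
  induction l with
  | nil => simp [countTrailB]
  | cons x r ih =>
      simp only [countTrailB, List.length_cons]
      split_ifs <;> omega

-- a suffix beyond all the indices is untouched by the loop
lemma trimLoopA_append (idxs : List Int) (res t : List (Option Int))
    (h : ∀ i ∈ idxs, 0 ≤ i ∧ i < (res.length : Int)) :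
    trimLoopA (res ++ t) idxs = trimLoopA res idxs ++ t := by
  induction idxs generalizing res with
  | nil => simp [trimLoopA]
  | cons i rest ih =>
      obtain ⟨h0, hlt⟩ := h i (by simp)
      have hnat : i.toNat < res.length := by omega
      have hget : PySem.List.pyGet? (res ++ t) i = PySem.List.pyGet? res i := by
        rw [PySem.List.pyGet?_of_nonneg _ h0, PySem.List.pyGet?_of_nonneg _ h0,
          List.getElem?_append_left hnat]
      have hset : (res ++ t).set i.toNat none = res.set i.toNat none ++ t := by
        rw [List.set_append]
        simp [hnat]
      simp only [trimLoopA, hget]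
      split_ifs with hc
      · rw [hset, ih]
        intro j hj
        have := h j (by simp [hj])
        simpa using this
      · rfl

lemma trimLoopA_eq_alt (vals : List Int) : trim_future_zeros vals = trim_future_zeros_alt vals := by
  induction vals using List.reverseRecOn with
  | nil => simp [trim_future_zeros, trim_future_zeros_alt, trimLoopA, countTrailB,
      PySem.List.pyRange_neg_one_eq_nil]
  | append_singleton ys x ih =>
      have hlen : ((ys ++ [x]).length : Int) - 1 = (ys.length : Int) := by simp
      have hcons : PySem.List.pyRange (ys.length : Int) (-1) (-1)
          = (ys.length : Int) :: PySem.List.pyRange ((ys.length : Int) - 1) (-1) (-1) := by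
        exact PySem.List.pyRange_neg_one_cons (by omega)
      have hmap : (ys ++ [x]).map (some : Int → Option Int) = ys.map some ++ [some x] := by simp
      have hget : PySem.List.pyGet? (ys.map some ++ [some x]) (ys.length : Int) = some (some x) := by
        simp
      unfold trim_future_zeros
      rw [hlen, hcons, hmap]
      simp only [trimLoopA, hget]
      by_cases hx : x = 0
      · subst hx
        have hset : (ys.map some ++ [some (0:Int)]).set ((ys.length : Int)).toNat none
            = ys.map some ++ [none] := by
          rw [List.set_append]
          simp
        rw [hset, trimLoopA_append _ _ _ (by
          intro j hj
          rw [PySem.List.mem_pyRange_neg_one] at hj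
          constructor <;> [omega; (simp; omega)])]
        rw [show trimLoopA (ys.map some) (PySem.List.pyRange ((ys.length : Int) - 1) (-1) (-1))
              = trim_future_zeros ys from rfl, ih]
        -- B side: alt (ys ++ [0]) = alt ys ++ [none]
        have hk := countTrailB_le ys.reverse
        simp only [trim_future_zeros_alt, List.reverse_append, List.reverse_singleton,
          List.length_append, List.length_cons, List.length_nil, List.cons_append, List.nil_append]
        simp only [countTrailB, ne_eq, not_true_eq_false, if_false]
        have hle : ys.length + 1 - (countTrailB ys.reverse + 1) ≤ ys.length := by omega
        rw [List.take_append_of_le_length (by omega), List.replicate_succ']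
        simp [List.append_assoc]
      · rw [if_neg (by simpa using hx)]
        have h0 : countTrailB (x :: ys.reverse) = 0 := by simp [countTrailB, hx]
        simp [trim_future_zeros_alt, h0, List.take_of_length_le]

-- ===== VERDICT (by name: the statement is the Claim_ definition above) =====
theorem trim_future_zeros_spec : Claim_equal_trim_future_zeros := by
  intro vals _
  exact trimLoopA_eq_alt vals
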